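-- pv_equiv track=rewrite | github.com/hengxin/IC3OnTLA | src/separator/separate.py | build_prefix_formula
-- ===== SOURCE A (Python) =====
-- from typing import List,Tuple, Iterable, Dict,DefaultDict,Iterator,Set
--
-- QuantifierStr = Tuple[bool, str]
--
-- def build_prefix_formula(prefix: List[QuantifierStr], f: str, n: int = 0):
--     if len(prefix) == 0:
--         return f
--     (is_forall, sort) = prefix[0]
--     if is_forall:
--         return "\A" + " x_" + str(n) + " \in Node : " + build_prefix_formula(prefix[1:], f, n + 1)
--     else:
--         return "\E" + " x_" +  str(n) + " \in Node : " + build_prefix_formula(prefix[1:], f, n + 1)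
-- ===== SOURCE B (Python) =====
-- def build_prefix_formula(prefix, f, n=0):
--     parts = []
--     for i, (is_forall, sort) in enumerate(prefix, start=n):
--         parts.append(("\A" if is_forall else "\E") + " x_" + str(i) + " \in Node : ")
--     return "".join(parts) + f
-- ===== Notes on version B (the rewrite author's own statement) =====
-- stated objective: faster
-- what changed: Replaced the recursion with an iterative enumerate loop collecting the quantifier fragments into a list joined once at the end.
import Mathlib
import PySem

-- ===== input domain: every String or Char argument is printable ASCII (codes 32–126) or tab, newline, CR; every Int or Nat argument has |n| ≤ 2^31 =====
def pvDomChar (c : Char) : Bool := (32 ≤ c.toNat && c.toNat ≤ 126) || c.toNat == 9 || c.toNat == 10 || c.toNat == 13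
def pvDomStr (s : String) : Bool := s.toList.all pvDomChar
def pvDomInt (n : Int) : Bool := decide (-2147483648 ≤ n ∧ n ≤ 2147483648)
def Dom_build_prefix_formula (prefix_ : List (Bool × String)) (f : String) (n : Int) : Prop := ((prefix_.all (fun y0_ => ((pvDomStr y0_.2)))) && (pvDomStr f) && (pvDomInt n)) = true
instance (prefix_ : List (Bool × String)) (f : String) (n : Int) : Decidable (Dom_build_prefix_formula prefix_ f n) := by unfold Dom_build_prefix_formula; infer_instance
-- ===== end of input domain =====

-- B: iterative enumerate-style fold collecting the quantifier fragments, joined once (same return value as A's recursion).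


-- ===== PORT A =====
def build_prefix_formula (prefix_ : List (Bool × String)) (f : String) (n : Int) : String :=
  match prefix_ with
  | [] => f
  | (is_forall, _sort) :: rest =>
    if is_forall then
      "\\A" ++ " x_" ++ PySem.Int.toStr n ++ " \\in Node : " ++ build_prefix_formula rest f (n + 1)
    else
      "\\E" ++ " x_" ++ PySem.Int.toStr n ++ " \\in Node : " ++ build_prefix_formula rest f (n + 1)

-- ===== PORT B =====
def build_prefix_formula_alt (prefix_ : List (Bool × String)) (f : String) (n : Int) : String :=
  let st := prefix_.foldl
    (fun (acc : List String × Int) q =>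
      (acc.1 ++ [(if q.1 then "\\A" else "\\E") ++ " x_" ++ PySem.Int.toStr acc.2 ++ " \\in Node : "],
       acc.2 + 1))
    ([], n)
  String.join st.1 ++ f

-- ===== PRECONDITION & SPEC =====
def Spec_build_prefix_formula (prefix_ : List (Bool × String)) (f : String) (n : Int) (out : String) : Prop := out = build_prefix_formula_alt prefix_ f n
instance (prefix_ : List (Bool × String)) (f : String) (n : Int) (out : String) : Decidable (Spec_build_prefix_formula prefix_ f n out) := by unfold Spec_build_prefix_formula; infer_instance

-- ===== CLAIM (what is proved, stated in full; the proofs are below) =====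
def Claim_equal_build_prefix_formula : Prop := ∀ (prefix_ : List (Bool × String)) (f : String) (n : Int), Dom_build_prefix_formula prefix_ f n → Spec_build_prefix_formula prefix_ f n (build_prefix_formula prefix_ f n)

-- ===== LEMMAS AND PROOFS =====

-- ===== VERDICT (by name: the statement is the Claim_ definition above) =====
lemma bpf_fold (l : List (Bool × String)) (f : String) (n : Int) (parts : List String) :
    String.join ((l.foldl
      (fun (acc : List String × Int) q =>
        (acc.1 ++ [(if q.1 then "\\A" else "\\E") ++ " x_" ++ PySem.Int.toStr acc.2 ++ " \\in Node : "],
         acc.2 + 1))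
      (parts, n)).1) ++ f
    = String.join parts ++ build_prefix_formula l f n := by
  induction l generalizing n parts with
  | nil => simp [build_prefix_formula]
  | cons q rest ih =>
    simp only [List.foldl_cons, build_prefix_formula]
    rw [ih]
    cases q with
    | mk b s =>
      cases b <;>
      · rw [show ∀ (ps : List String) (x : String), String.join (ps ++ [x]) = String.join ps ++ x from
          fun ps x => by simp [String.join]]
        simp [String.append_assoc]

theorem build_prefix_formula_spec : Claim_equal_build_prefix_formula := by
  intro prefix_ f n _
  unfold Spec_build_prefix_formula build_prefix_formula_alt
  have := bpf_fold prefix_ f n []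
  simp only [String.join, List.foldl_nil] at this ⊢
  simpa using this.symm
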